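-- pv_equiv track=rewrite | github.com/mkhnuser/yp_algo_problems | sprint_5/m.py | recurse_sift_up
-- ===== SOURCE A (Python) =====
-- import math
--
-- def get_parent_index(index):
--     return math.floor((index) / 2)
--
-- def recurse_sift_up(heap, index):
--     if index == 1:
--         return index
--
--     parent_index = get_parent_index(index)
--     parent_value = heap[parent_index]
--     current_value = heap[index]
--
--     if current_value > parent_value:
--         heap[index] = parent_value
--         heap[parent_index] = current_value
--         index = recurse_sift_up(heap, parent_index)
--
--     return index
-- ===== SOURCE B (Python) =====
-- def recurse_sift_up(heap, index):
--     while index != 1 and heap[index] > heap[index // 2]: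
--         parent = index // 2
--         heap[index], heap[parent] = heap[parent], heap[index]
--         index = parent
--     return index
-- ===== Notes on version B (the rewrite author's own statement) =====
-- stated objective: idiomatic
-- what changed: Replaces the recursion (helper get_parent_index, math.floor float division, separate swap assignments, post-recursion return threading) with a single idiomatic while loop whose guard fuses the two exit tests, using integer // and a tuple swap.
import Mathlib
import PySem

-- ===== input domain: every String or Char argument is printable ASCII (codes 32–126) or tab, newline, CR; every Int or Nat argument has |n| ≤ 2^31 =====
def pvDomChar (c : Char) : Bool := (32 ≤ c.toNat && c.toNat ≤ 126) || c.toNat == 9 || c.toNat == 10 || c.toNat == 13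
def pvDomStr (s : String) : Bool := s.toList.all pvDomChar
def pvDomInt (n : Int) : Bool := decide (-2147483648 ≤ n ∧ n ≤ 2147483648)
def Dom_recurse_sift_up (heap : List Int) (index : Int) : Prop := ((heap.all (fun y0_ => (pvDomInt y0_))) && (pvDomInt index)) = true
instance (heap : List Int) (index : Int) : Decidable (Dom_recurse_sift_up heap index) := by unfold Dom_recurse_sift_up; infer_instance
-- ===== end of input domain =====

-- B replaces A's recursion with an idiomatic while loop (fused guard, tuple swap, integer //);
-- equivalence is about the RETURN value (in Python both perform the identical in-place swaps).

-- termination fact both ports cite: the parent index has strictly smaller absolute value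
-- (for index ∈ {0, -1} the parent equals index, but then the swap branch compares a value
-- with itself and is never taken, handled separately at each call site)
theorem pv_fdiv_two_natAbs_lt (index : Int) (h0 : index ≠ 0) (h1 : index ≠ 1)
    (hm1 : index ≠ -1) : (Int.fdiv index 2).natAbs < index.natAbs := by
  have hfd : Int.fdiv index 2 = index / 2 - if (0:Int) ≤ 2 ∨ (2:Int) ∣ index then 0 else 1 :=
    Int.fdiv_eq_ediv
  simp at hfd
  omega

-- ===== PORT A =====
-- math.floor(index / 2): float division is exact for |index| ≤ 2^31, so this is floor division
def get_parent_index (index : Int) : Int := PySem.Int.floordiv index 2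

def recurse_sift_up (heap : List Int) (index : Int) : Int :=
  if index = 1 then index
  else
    let parent_index := get_parent_index index
    let parent_value := PySem.List.pyGetD heap parent_index 0
    let current_value := PySem.List.pyGetD heap index 0
    if h : parent_value < current_value then
      let heap1 := PySem.List.pySetD heap index parent_value
      let heap2 := PySem.List.pySetD heap1 parent_index current_value
      recurse_sift_up heap2 parent_index
    else index
termination_by index.natAbs
decreasing_by
  simp only [parent_index, parent_value, current_value, get_parent_index, PySem.Int.floordiv] at h ⊢
  by_cases h0 : index = 0
  · rw [h0, show Int.fdiv 0 2 = 0 from by decide] at h; exact absurd h (lt_irrefl _)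
  by_cases hm1 : index = -1
  · rw [hm1, show Int.fdiv (-1) 2 = -1 from by decide] at h; exact absurd h (lt_irrefl _)
  exact pv_fdiv_two_natAbs_lt index h0 (by assumption) hm1

-- ===== PORT B =====
-- the while loop: guard 'index != 1 and heap[index] > heap[index // 2]', tuple swap, step to parent
def recurse_sift_up_alt (heap : List Int) (index : Int) : Int :=
  if h : index ≠ 1 ∧ PySem.List.pyGetD heap (PySem.Int.floordiv index 2) 0 < PySem.List.pyGetD heap index 0 then
    let parent := PySem.Int.floordiv index 2
    recurse_sift_up_alt
      (PySem.List.pySetD (PySem.List.pySetD heap index (PySem.List.pyGetD heap parent 0))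
        parent (PySem.List.pyGetD heap index 0))
      parent
  else index
termination_by index.natAbs
decreasing_by
  obtain ⟨h1, h2⟩ := h
  simp only [PySem.Int.floordiv] at h2 ⊢
  by_cases h0 : index = 0
  · rw [h0, show Int.fdiv 0 2 = 0 from by decide] at h2; exact absurd h2 (lt_irrefl _)
  by_cases hm1 : index = -1
  · rw [hm1, show Int.fdiv (-1) 2 = -1 from by decide] at h2; exact absurd h2 (lt_irrefl _)
  exact pv_fdiv_two_natAbs_lt index h0 h1 hm1

-- ===== PRECONDITION & SPEC =====
-- Pre_ excludes exactly the inputs on which Python's heap[index] / heap[parent] raises IndexError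
def Pre_recurse_sift_up (heap : List Int) (index : Int) : Prop :=
  index = 1 ∨ (-(heap.length : Int) ≤ index ∧ index < heap.length)
instance (heap : List Int) (index : Int) : Decidable (Pre_recurse_sift_up heap index) := by
  unfold Pre_recurse_sift_up; infer_instance

def pvWitness_recurse_sift_up : List Int × Int := ([0, 3, 5, 4], 2)

def Spec_recurse_sift_up (heap : List Int) (index : Int) (out : Int) : Prop := out = recurse_sift_up_alt heap index
instance (heap : List Int) (index : Int) (out : Int) : Decidable (Spec_recurse_sift_up heap index out) := by unfold Spec_recurse_sift_up; infer_instance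

-- ===== CLAIM (what is proved, stated in full; the proofs are below) =====
def Claim_equal_recurse_sift_up : Prop := ∀ (heap : List Int) (index : Int), Dom_recurse_sift_up heap index → Pre_recurse_sift_up heap index → Spec_recurse_sift_up heap index (recurse_sift_up heap index)

-- ===== LEMMAS AND PROOFS =====
theorem recurse_sift_up_eq_alt (heap : List Int) (index : Int) :
    recurse_sift_up heap index = recurse_sift_up_alt heap index := by
  fun_induction recurse_sift_up heap index with
  | case1 heap =>
      rw [recurse_sift_up_alt]
      simp
  | case2 heap index h1 pi pv cv h hp1 hp2 ih =>
      rw [ih]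
      conv_rhs => rw [recurse_sift_up_alt]
      rw [dif_pos ⟨h1, h⟩]
      rfl
  | case3 heap index h1 pi pv cv h =>
      conv_rhs => rw [recurse_sift_up_alt]
      rw [dif_neg (fun hc => h hc.2)]

-- ===== VERDICT (by name: the statement is the Claim_ definition above) =====
theorem recurse_sift_up_spec : Claim_equal_recurse_sift_up := by
  intro heap index _ _
  exact recurse_sift_up_eq_alt heap index
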